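-- pv_equiv track=rewrite | github.com/GKakuuu/Auxiliatura_SIS110_G1_Gestion1_25 | 0_EXTRAS/Solucionarios/P_3/Eje_06.py | limpiar_registros
-- ===== SOURCE A (Python) =====
-- def limpiar_registros(registros):
--     usuarios = {}
--     for registro in registros:
--         if ':' not in registro:
--             continue
--         usuario, libros = registro.split(':', 1)
--         usuario = usuario.strip().lower()
--         libros_lista = [libro.strip() for libro in libros.split(',') if libro.strip()]
--         if usuario not in usuarios:
--             usuarios[usuario] = set()
--         usuarios[usuario].update(libros_lista)
--     resultado = {}
--     for usuario, libros in usuarios.items():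
--         resultado[usuario] = ', '.join(sorted(libros))
--     return resultado
-- ===== SOURCE B (Python) =====
-- def limpiar_registros(registros):
--     # Flat-pair decomposition: collect (usuario, libro) pairs and the users in
--     # first-appearance order in one pass, then build each user's line by
--     # filtering the flat list (no per-user set maintained during the scan).
--     pares = []
--     orden = []
--     for registro in registros:
--         if ':' not in registro:
--             continue
--         usuario, libros = registro.split(':', 1)
--         usuario = usuario.strip().lower()
--         for libro in libros.split(','):
--             libro = libro.strip()
--             if libro:
--                 pares.append((usuario, libro))
--         if usuario not in orden:
--             orden.append(usuario)
--     return {u: ', '.join(sorted({l for v, l in pares if v == u})) for u in orden}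
-- ===== Notes on version B (the rewrite author's own statement) =====
-- stated objective: alternative
-- what changed: B replaces A's incremental dict of per-user sets (updated record by record, then sorted per user) by one pass that collects a flat (usuario, libro) pair list plus the users in first-appearance order, and then builds each user's line by filtering the flat list, deduplicating with a set comprehension and sorting.
import Mathlib
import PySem

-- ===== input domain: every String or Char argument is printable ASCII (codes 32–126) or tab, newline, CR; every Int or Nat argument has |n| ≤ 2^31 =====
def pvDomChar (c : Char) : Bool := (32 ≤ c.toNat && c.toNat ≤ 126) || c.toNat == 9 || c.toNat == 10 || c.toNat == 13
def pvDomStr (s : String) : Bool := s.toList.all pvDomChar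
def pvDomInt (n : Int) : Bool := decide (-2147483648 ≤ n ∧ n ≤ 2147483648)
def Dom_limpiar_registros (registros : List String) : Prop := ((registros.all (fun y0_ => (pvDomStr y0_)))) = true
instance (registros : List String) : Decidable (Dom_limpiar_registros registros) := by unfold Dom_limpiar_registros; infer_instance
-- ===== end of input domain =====

-- B replaces A's per-user set aggregation by a flat (user, book) pair list plus a
-- first-appearance user list, grouping by filtering at the end (objective: alternative).

-- ===== PORT A =====
-- 'if usuario not in usuarios: usuarios[usuario] = set(); usuarios[usuario].update(ls)'
-- is exactly Dict.modify usuario Set.empty (Set.update · ls)  (d[k] = f(d.get(k, dflt))).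
def limpiar_registros (registros : List String) : List (String × String) :=
  let usuarios : PySem.Dict String (PySem.Set String) :=
    registros.foldl (fun usuarios registro =>
      if PySem.Str.isIn ":" registro then
        -- ':' ∈ registro, so split(':', 1) yields exactly two pieces; '_' is unreachable
        match PySem.Str.splitMax? registro ":" 1 with
        | some (usuario :: libros :: _) =>
          let usuario := PySem.Str.lower (PySem.Str.strip usuario)
          let libros_lista :=
            (((PySem.Str.split? libros ",").getD []).map PySem.Str.strip).filter
              (fun libro => !(libro == ""))
          usuarios.modify usuario PySem.Set.empty (fun s => PySem.Set.update s libros_lista)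
        | _ => usuarios
      else usuarios) PySem.Dict.empty
  (usuarios.items.foldl (fun resultado p =>
      resultado.insert p.1 (PySem.Str.join ", " (PySem.List.sorted p.2 (fun x => x) false)))
    PySem.Dict.empty).items

-- ===== PORT B =====
def limpiar_registros_alt (registros : List String) : List (String × String) :=
  let st : List (String × String) × List String :=
    registros.foldl (fun st registro =>
      if PySem.Str.isIn ":" registro then
        match PySem.Str.splitMax? registro ":" 1 with
        | none => st
        | some partes =>
          match partes with
          | [] => st
          | usuario :: resto =>
            match resto with
            | [] => st
            | libros :: _ =>
              let u := PySem.Str.lower (PySem.Str.strip usuario)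
              let bs :=
                (((PySem.Str.split? libros ",").getD []).map PySem.Str.strip).filter
                  (fun libro => !(libro == ""))
              (st.1 ++ bs.map (fun b => (u, b)), if u ∈ st.2 then st.2 else st.2 ++ [u])
      else st) ([], [])
  st.2.map (fun u =>
    (u, PySem.Str.join ", "
          (PySem.List.sorted
            (PySem.Set.ofList ((st.1.filter (fun p => p.1 == u)).map Prod.snd))
            (fun x => x) false)))

-- ===== PRECONDITION & SPEC =====
def Spec_limpiar_registros (registros : List String) (out : List (String × String)) : Prop := out = limpiar_registros_alt registros
instance (registros : List String) (out : List (String × String)) : Decidable (Spec_limpiar_registros registros out) := by unfold Spec_limpiar_registros; infer_instance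

-- ===== CLAIM (what is proved, stated in full; the proofs are below) =====
def Claim_equal_limpiar_registros : Prop := ∀ (registros : List String), Dom_limpiar_registros registros → Spec_limpiar_registros registros (limpiar_registros registros)

-- ===== LEMMAS AND PROOFS =====

-- the books of user u in the flat pair list, as the set A maintains for u
def pvBooks (pares : List (String × String)) (u : String) : PySem.Set String :=
  PySem.Set.ofList ((pares.filter (fun p => p.1 == u)).map Prod.snd)

-- A's loop body / B's loop body, named so the induction can talk about them
def pvStepA (usuarios : PySem.Dict String (PySem.Set String)) (registro : String) :
    PySem.Dict String (PySem.Set String) :=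
  if PySem.Str.isIn ":" registro then
    match PySem.Str.splitMax? registro ":" 1 with
    | some (usuario :: libros :: _) =>
      let usuario := PySem.Str.lower (PySem.Str.strip usuario)
      let libros_lista :=
        (((PySem.Str.split? libros ",").getD []).map PySem.Str.strip).filter
          (fun libro => !(libro == ""))
      usuarios.modify usuario PySem.Set.empty (fun s => PySem.Set.update s libros_lista)
    | _ => usuarios
  else usuarios

def pvStepB (st : List (String × String) × List String) (registro : String) :
    List (String × String) × List String :=
  if PySem.Str.isIn ":" registro then
    match PySem.Str.splitMax? registro ":" 1 with
    | none => st
    | some partes =>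
      match partes with
      | [] => st
      | usuario :: resto =>
        match resto with
        | [] => st
        | libros :: _ =>
          let u := PySem.Str.lower (PySem.Str.strip usuario)
          let bs :=
            (((PySem.Str.split? libros ",").getD []).map PySem.Str.strip).filter
              (fun libro => !(libro == ""))
          (st.1 ++ bs.map (fun b => (u, b)), if u ∈ st.2 then st.2 else st.2 ++ [u])
  else st

-- the loop invariant tying A's dict to B's flat state
def pvInv (d : PySem.Dict String (PySem.Set String))
    (st : List (String × String) × List String) : Prop :=
  d.items = st.2.map (fun u => (u, pvBooks st.1 u)) ∧ st.2.Nodup ∧ ∀ p ∈ st.1, p.1 ∈ st.2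

lemma pvBooks_append_ne (pares : List (String × String)) (bs : List String) (u u' : String)
    (h : u' ≠ u) : pvBooks (pares ++ bs.map (fun b => (u, b))) u' = pvBooks pares u' := by
  simp [pvBooks, List.filter_append, List.filter_map]
  have : (List.filter ((fun p => p.1 == u') ∘ fun b => (u, b)) bs) = [] := by
    simp [List.filter_eq_nil_iff]
    intro b _ hb
    exact h (by simpa using hb.symm)
  simp [this]

lemma pvBooks_append_self (pares : List (String × String)) (bs : List String) (u : String) :
    pvBooks (pares ++ bs.map (fun b => (u, b))) u = PySem.Set.update (pvBooks pares u) bs := by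
  simp [pvBooks, List.filter_append, List.filter_map, PySem.Set.ofList_append]
  have : (List.filter ((fun p => p.1 == u) ∘ fun b => (u, b)) bs) = bs := by
    simp [List.filter_eq_self]
  simp [this]

lemma pvBooks_not_mem (pares : List (String × String)) (orden : List String) (u : String)
    (hcl : ∀ p ∈ pares, p.1 ∈ orden) (hu : u ∉ orden) : pvBooks pares u = PySem.Set.empty := by
  have : pares.filter (fun p => p.1 == u) = [] := by
    simp [List.filter_eq_nil_iff]
    intro a b hab h
    exact hu (h ▸ hcl (a, b) hab)
  simp [pvBooks, this, PySem.Set.ofList]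

lemma pvInv_step (d : PySem.Dict String (PySem.Set String))
    (st : List (String × String) × List String) (registro : String)
    (h : pvInv d st) : pvInv (pvStepA d registro) (pvStepB st registro) := by
  obtain ⟨hitems, hnd, hcl⟩ := h
  unfold pvStepA pvStepB
  by_cases hc : PySem.Str.isIn ":" registro = true
  · simp only [hc, if_pos]
    rcases hsp : PySem.Str.splitMax? registro ":" 1 with _ | ⟨_ | ⟨usuario, _ | ⟨libros, rest⟩⟩⟩
    · exact ⟨hitems, hnd, hcl⟩
    · exact ⟨hitems, hnd, hcl⟩
    · exact ⟨hitems, hnd, hcl⟩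
    · -- the real branch
      dsimp only
      set u := PySem.Str.lower (PySem.Str.strip usuario) with hu
      set bs := (((PySem.Str.split? libros ",").getD []).map PySem.Str.strip).filter
          (fun libro => !(libro == "")) with hbs
      have hkeys : d.keys = st.2 := by
        simp [PySem.Dict.keys, hitems, Function.comp_def]
      have hmodify : d.modify u PySem.Set.empty (fun s => PySem.Set.update s bs)
          = d.insert u (PySem.Set.update (d.getD u PySem.Set.empty) bs) := rfl
      by_cases hmem : u ∈ st.2
      · -- existing user: insert overwrites in place
        have hcont : d.contains u = true := by
          rw [PySem.Dict.contains_eq_decide_mem_keys, hkeys]; simpa using hmem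
        have hget : d.getD u PySem.Set.empty = pvBooks st.1 u := by
          apply PySem.Dict.getD_of_mem_items
          · rw [hitems]; exact List.mem_map_of_mem hmem
          · rw [hkeys]; exact hnd
        refine ⟨?_, by simp [hmem, hnd], ?_⟩
        · rw [hmodify, PySem.Dict.items_insert_of_contains d _ hcont, hitems, hget]
          simp only [hmem, if_pos, List.map_map]
          apply List.map_congr_left
          intro o ho
          by_cases heq : o = u
          · subst heq; simp [pvBooks_append_self]
          · have : (o == u) = false := by simpa using heq
            simp only [Function.comp_def, this, Bool.false_eq_true, if_false,
              pvBooks_append_ne _ _ _ _ heq]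
        · intro p hp
          simp only [hmem, if_pos]
          rcases List.mem_append.mp hp with h1 | h2
          · exact hcl p h1
          · rcases List.mem_map.mp h2 with ⟨b, _, rfl⟩; exact hmem
      · -- new user: insert appends
        have hcont : d.contains u = false := by
          rw [PySem.Dict.contains_eq_decide_mem_keys, hkeys]; simpa using hmem
        have hget : d.getD u PySem.Set.empty = PySem.Set.empty :=
          PySem.Dict.getD_of_not_contains _ _ hcont
        have hnd' : (st.2 ++ [u]).Nodup := by
          refine hnd.append (List.nodup_singleton u) ?_
          intro a ha hb
          rw [List.mem_singleton] at hb
          exact hmem (hb ▸ ha)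
        refine ⟨?_, by rw [if_neg hmem]; exact hnd', ?_⟩
        · rw [hmodify, PySem.Dict.items_insert_of_not_contains d _ hcont, hitems, hget,
            if_neg hmem, List.map_append, List.map_cons, List.map_nil]
          have h1 : List.map (fun u => (u, pvBooks st.1 u)) st.2
              = List.map (fun o => (o, pvBooks (st.1 ++ bs.map (fun b => (u, b))) o)) st.2 := by
            apply List.map_congr_left
            intro o ho
            have heq : o ≠ u := fun h => hmem (h ▸ ho)
            rw [pvBooks_append_ne _ _ _ _ heq]
          have h2 : pvBooks (st.1 ++ bs.map (fun b => (u, b))) u = PySem.Set.empty.update bs := by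
            rw [pvBooks_append_self, pvBooks_not_mem _ _ _ hcl hmem]
          rw [h1, h2]
        · intro p hp
          rw [if_neg hmem]
          rcases List.mem_append.mp hp with h1 | h2
          · exact List.mem_append_left _ (hcl p h1)
          · rcases List.mem_map.mp h2 with ⟨b, _, rfl⟩; simp
  · simp only [Bool.not_eq_true] at hc
    simp only [hc, Bool.false_eq_true, if_false]
    exact ⟨hitems, hnd, hcl⟩

lemma pvInv_foldl (registros : List String) (d : PySem.Dict String (PySem.Set String))
    (st : List (String × String) × List String) (h : pvInv d st) :
    pvInv (registros.foldl pvStepA d) (registros.foldl pvStepB st) := by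
  induction registros generalizing d st with
  | nil => exact h
  | cons r rs ih => exact ih _ _ (pvInv_step d st r h)

-- ===== VERDICT (by name: the statement is the Claim_ definition above) =====
theorem limpiar_registros_spec : Claim_equal_limpiar_registros := by
  intro registros _
  unfold Spec_limpiar_registros
  obtain ⟨hitems, hnd, -⟩ :=
    pvInv_foldl registros PySem.Dict.empty ([], []) ⟨rfl, List.nodup_nil, by simp⟩
  show ((registros.foldl pvStepA PySem.Dict.empty).items.foldl (fun resultado p =>
      resultado.insert p.1 (PySem.Str.join ", " (PySem.List.sorted p.2 (fun x => x) false)))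
    PySem.Dict.empty).items
    = (registros.foldl pvStepB ([], [])).2.map (fun u => (u, PySem.Str.join ", "
        (PySem.List.sorted (PySem.Set.ofList (((registros.foldl pvStepB ([], [])).1.filter
          (fun p => p.1 == u)).map Prod.snd)) (fun x => x) false)))
  have hfresh : ∀ a ∈ (registros.foldl pvStepA PySem.Dict.empty).items,
      (PySem.Dict.empty : PySem.Dict String String).contains a.1 = false := by
    intro a _; exact PySem.Dict.contains_empty _
  have hndk : ((registros.foldl pvStepA PySem.Dict.empty).items.map Prod.fst).Nodup := by
    rw [hitems, List.map_map]; simpa [Function.comp_def] using hnd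
  rw [PySem.Dict.items_foldl_insert_fresh _ Prod.fst
      (fun p => PySem.Str.join ", " (PySem.List.sorted p.2 (fun x => x) false)) _ hfresh hndk]
  rw [hitems, List.map_map]
  simp [Function.comp_def, pvBooks]
  rfl
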